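-- pv_equiv track=rewrite | github.com/NVIDIA-NeMo/Gym | resources_servers/textworld/scripts/generate_games.py | generate_treasure_hunter_configs
-- ===== SOURCE A (Python) =====
-- from typing import Dict, List, Any, Tuple
--
-- def generate_treasure_hunter_configs(num_games: int, output_dir: str) -> List[Tuple[int, int, str]]:
--     configs = []
--
--     games_per_level = num_games // 30
--     extra = num_games % 30
--
--     idx = 0
--     for level in range(1, 31):
--         count = games_per_level + (1 if level <= extra else 0)
--         for j in range(count):
--             configs.append((idx, level, output_dir))
--             idx += 1
--
--     return configs
-- ===== SOURCE B (Python) =====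
-- from typing import List, Tuple
--
-- def generate_treasure_hunter_configs(num_games: int, output_dir: str) -> List[Tuple[int, int, str]]:
--     base, extra = divmod(num_games, 30)
--     threshold = extra * (base + 1)
--     return [
--         (i,
--          i // (base + 1) + 1 if i < threshold
--          else extra + (i - threshold) // base + 1,
--          output_dir)
--         for i in range(num_games)
--     ]
-- ===== Notes on version B (the rewrite author's own statement) =====
-- stated objective: alternative
-- what changed: Replaces A's nested level-then-game loops with one flat pass over the game indices that derives each game's level by a closed-form floor-division formula.
import Mathlib
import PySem

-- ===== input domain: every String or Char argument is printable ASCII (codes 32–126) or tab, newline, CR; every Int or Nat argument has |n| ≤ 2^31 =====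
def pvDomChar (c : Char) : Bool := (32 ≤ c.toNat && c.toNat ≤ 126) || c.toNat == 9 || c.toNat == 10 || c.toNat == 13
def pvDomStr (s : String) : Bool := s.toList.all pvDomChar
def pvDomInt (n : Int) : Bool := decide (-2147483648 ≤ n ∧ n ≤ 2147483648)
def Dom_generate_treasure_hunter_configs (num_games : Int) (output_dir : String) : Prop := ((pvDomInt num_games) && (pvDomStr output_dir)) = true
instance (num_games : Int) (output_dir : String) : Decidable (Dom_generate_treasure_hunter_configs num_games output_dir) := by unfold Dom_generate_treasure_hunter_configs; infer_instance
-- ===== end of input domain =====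

-- B replaces A's nested level-then-game loops with one flat pass over the game indices,
-- deriving each game's level by a closed-form floor-division formula (objective: alternative).

-- ===== PORT A =====
def generate_treasure_hunter_configs (num_games : Int) (output_dir : String) : List (Int × Int × String) :=
  let games_per_level := PySem.Int.floordiv num_games 30
  let extra := PySem.Int.mod num_games 30
  let st := (PySem.List.pyRange 1 31 1).foldl
      (fun (st : List (Int × Int × String) × Int) level =>
        (PySem.List.pyRange 0 (games_per_level + (if level ≤ extra then (1 : Int) else 0)) 1).foldl
          (fun st _j => (st.1 ++ [(st.2, level, output_dir)], st.2 + 1)) st)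
      ([], 0)
  st.1

-- ===== PORT B =====
def generate_treasure_hunter_configs_alt (num_games : Int) (output_dir : String) : List (Int × Int × String) :=
  let base := PySem.Int.floordiv num_games 30
  let extra := PySem.Int.mod num_games 30
  let threshold := extra * (base + 1)
  (PySem.List.pyRange 0 num_games 1).map (fun i =>
    (i,
     if i < threshold then PySem.Int.floordiv i (base + 1) + 1
     else extra + PySem.Int.floordiv (i - threshold) base + 1,
     output_dir))

-- ===== PRECONDITION & SPEC =====
def Spec_generate_treasure_hunter_configs (num_games : Int) (output_dir : String) (out : List (Int × Int × String)) : Prop := out = generate_treasure_hunter_configs_alt num_games output_dir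
instance (num_games : Int) (output_dir : String) (out : List (Int × Int × String)) : Decidable (Spec_generate_treasure_hunter_configs num_games output_dir out) := by unfold Spec_generate_treasure_hunter_configs; infer_instance

-- ===== CLAIM (what is proved, stated in full; the proofs are below) =====
def Claim_equal_generate_treasure_hunter_configs : Prop := ∀ (num_games : Int) (output_dir : String), Dom_generate_treasure_hunter_configs num_games output_dir → Spec_generate_treasure_hunter_configs num_games output_dir (generate_treasure_hunter_configs num_games output_dir)

-- ===== LEMMAS AND PROOFS =====

-- B's per-index level formula, named so the invariant below can speak about it.
def pvLevelFn (base extra : Int) (i : Int) : Int :=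
  if i < extra * (base + 1) then PySem.Int.floordiv i (base + 1) + 1
  else extra + PySem.Int.floordiv (i - extra * (base + 1)) base + 1

-- A's inner loop ignores its iteration variable: it appends one tuple and bumps idx per element.
theorem pv_inner_fold (L : Int) (d : String) :
    ∀ (l : List Int) (acc : List (Int × Int × String)) (idx : Int),
      l.foldl (fun st _j => (st.1 ++ [(st.2, L, d)], st.2 + 1)) (acc, idx)
        = (acc ++ (List.range l.length).map (fun (j : Nat) => (idx + (j : Int), L, d)), idx + l.length) := by
  intro l
  induction l with
  | nil => intro acc idx; simp
  | cons x xs ih =>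
      intro acc idx
      rw [List.foldl_cons, ih]
      rw [Prod.mk.injEq]
      refine ⟨?_, by rw [List.length_cons]; push_cast; ring⟩
      rw [List.length_cons, List.range_succ_eq_map, List.map_cons, List.map_map,
        List.append_assoc, List.singleton_append]
      simp only [Function.comp_def, Nat.cast_zero, add_zero, Nat.cast_succ]
      refine congrArg (fun t => acc ++ (idx, L, d) :: t) ?_
      apply List.map_congr_left
      intro a _
      have h : idx + 1 + (a : Int) = idx + ((a : Int) + 1) := by ring
      rw [h]

-- A fold whose step is the identity is the identity.
theorem pv_foldl_id {α β : Type} (f : β → α → β) (h : ∀ st x, f st x = st) :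
    ∀ (l : List α) (st : β), l.foldl f st = st := by
  intro l
  induction l with
  | nil => intro st; simp
  | cons x xs ih => intro st; rw [List.foldl_cons, h, ih]

-- Key arithmetic fact: on the index block of level k+1, B's closed form evaluates to k+1.
theorem pv_level_formula (base extra : Int) (hb : 0 ≤ base)
    (k j : Int)
    (hj0 : 0 ≤ j) (hj : j < base + (if k + 1 ≤ extra then (1 : Int) else 0)) :
    pvLevelFn base extra (base * k + min k extra + j) = k + 1 := by
  unfold pvLevelFn
  by_cases hke : k + 1 ≤ extra
  · have hmin : min k extra = k := by omega
    rw [hmin]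
    rw [if_pos hke] at hj
    have hlt : base * k + k + j < extra * (base + 1) := by nlinarith
    rw [if_pos hlt]
    have hq : PySem.Int.floordiv (base * k + k + j) (base + 1) = k := by
      rw [PySem.Int.floordiv_eq_iff_of_pos (by omega)]
      constructor <;> nlinarith
    rw [hq]
  · have hmin : min k extra = extra := by omega
    rw [hmin]
    rw [if_neg hke] at hj
    have hbpos : 0 < base := by omega
    have hge : ¬ base * k + extra + j < extra * (base + 1) := by nlinarith
    rw [if_neg hge]
    have hq : PySem.Int.floordiv (base * k + extra + j - extra * (base + 1)) base = k - extra := by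
      rw [PySem.Int.floordiv_eq_iff_of_pos hbpos]
      constructor <;> nlinarith
    rw [hq]
    ring

-- Invariant of A's outer loop: after the first k levels the accumulator holds exactly the
-- first base*k + min k extra entries of B's flat map, and idx equals that count.
theorem pv_outer_inv (d : String) (base extra : Int) (hb : 0 ≤ base) (he : 0 ≤ extra) :
    ∀ (k : Nat),
      ((List.range k).map (fun (t : Nat) => 1 + (t : Int))).foldl
          (fun (st : List (Int × Int × String) × Int) level =>
            (PySem.List.pyRange 0 (base + (if level ≤ extra then (1 : Int) else 0)) 1).foldl
              (fun st _j => (st.1 ++ [(st.2, level, d)], st.2 + 1)) st)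
          ([], 0)
        = ((List.range (base * k + min (k : Int) extra).toNat).map
             (fun (j : Nat) => ((j : Int), pvLevelFn base extra (j : Int), d)),
           base * k + min (k : Int) extra) := by
  intro k
  induction k with
  | zero => simp [he]
  | succ k ih =>
      rw [List.range_succ, List.map_append, List.foldl_append, ih]
      simp only [List.map_cons, List.map_nil, List.foldl_cons, List.foldl_nil]
      rw [pv_inner_fold]
      set count : Int := base + (if 1 + (k : Int) ≤ extra then (1 : Int) else 0) with hcount
      have hc0 : 0 ≤ count := by rw [hcount]; split_ifs <;> omega
      have hlen : (PySem.List.pyRange 0 count 1).length = count.toNat := by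
        rw [PySem.List.length_pyRange_one]; omega
      set S : Int := base * (k : Int) + min (k : Int) extra with hS
      have hS0 : 0 ≤ S := by
        rw [hS]
        have h1 : 0 ≤ base * (k : Int) := by positivity
        have h2 : (0 : Int) ≤ min (k : Int) extra := by
          have := Int.natCast_nonneg k; omega
        omega
      have hSucc : base * ((k : Nat) + 1 : Nat) + min (((k : Nat) + 1 : Nat) : Int) extra
          = S + count := by
        rw [hS, hcount]
        push_cast
        split_ifs <;> [skip; skip] <;> ring_nf <;> omega
      rw [Prod.mk.injEq]
      constructor
      · rw [hlen]
        have hsplit : (base * (((k : Nat) + 1 : Nat)) + min (((k : Nat) + 1 : Nat) : Int) extra).toNat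
            = S.toNat + count.toNat := by
          rw [hSucc]; omega
        rw [hsplit, List.range_add, List.map_append, List.map_map]
        congr 1
        apply List.map_congr_left
        intro a ha
        simp only [Function.comp_apply]
        have hac : (a : Int) < count := by
          rw [List.mem_range] at ha; omega
        have hSa : S + (a : Int) = ((S.toNat + a : Nat) : Int) := by push_cast; omega
        have hlv : pvLevelFn base extra (S + (a : Int)) = (k : Int) + 1 := by
          have := pv_level_formula base extra hb (k : Int) (a : Int)
            (Int.natCast_nonneg a)
            (by simp only [hcount] at hac; split_ifs at hac ⊢ <;> omega)
          rw [hS]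
          rw [← this]
        rw [← hSa, hlv, add_comm (1 : Int) (k : Int)]
      · rw [hlen, hSucc]; omega

-- ===== VERDICT (by name: the statement is the Claim_ definition above) =====
theorem generate_treasure_hunter_configs_spec : Claim_equal_generate_treasure_hunter_configs := by
  intro n d _
  unfold Spec_generate_treasure_hunter_configs
  simp only [generate_treasure_hunter_configs, generate_treasure_hunter_configs_alt]
  have hfd : PySem.Int.floordiv n 30 = n / 30 := PySem.Int.floordiv_eq_ediv_of_pos (by norm_num)
  by_cases hn : 0 ≤ n
  · have hb : 0 ≤ PySem.Int.floordiv n 30 := by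
      rw [hfd]; exact Int.ediv_nonneg hn (by norm_num)
    have he : 0 ≤ PySem.Int.mod n 30 := PySem.Int.mod_nonneg n (by norm_num)
    have he30 : PySem.Int.mod n 30 < 30 := PySem.Int.mod_lt n (by norm_num)
    have hsum : PySem.Int.floordiv n 30 * 30 + PySem.Int.mod n 30 = n :=
      PySem.Int.floordiv_mul_add_mod n 30
    have h30 : PySem.List.pyRange 1 31 1 = (List.range 30).map (fun (t : Nat) => 1 + (t : Int)) := by
      decide
    rw [h30, pv_outer_inv d _ _ hb he 30]
    have htot : PySem.Int.floordiv n 30 * 30 + min ((30 : Nat) : Int) (PySem.Int.mod n 30) = n := by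
      push_cast; omega
    rw [PySem.List.pyRange_one 0 n]
    rw [List.map_map]
    have hN : ((n : Int) - 0).toNat = n.toNat := by omega
    rw [hN]
    have hidx : (PySem.Int.floordiv n 30 * 30 + min ((30 : Nat) : Int) (PySem.Int.mod n 30)).toNat = n.toNat := by
      rw [htot]
    rw [show PySem.Int.floordiv n 30 * ((30 : Nat) : Int) = PySem.Int.floordiv n 30 * 30 by norm_num]
    rw [hidx]
    apply List.map_congr_left
    intro a _
    simp only [Function.comp_apply, zero_add]
    unfold pvLevelFn
    rfl
  · have hbneg : PySem.Int.floordiv n 30 < 0 := by rw [hfd]; omega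
    have hcount : ∀ level : Int,
        PySem.Int.floordiv n 30 + (if level ≤ PySem.Int.mod n 30 then (1 : Int) else 0) ≤ 0 := by
      intro level; split_ifs <;> omega
    have hid : ∀ (st : List (Int × Int × String) × Int) (level : Int),
        (PySem.List.pyRange 0 (PySem.Int.floordiv n 30 + (if level ≤ PySem.Int.mod n 30 then (1 : Int) else 0)) 1).foldl
          (fun st _j => (st.1 ++ [(st.2, level, d)], st.2 + 1)) st = st := by
      intro st level
      rw [PySem.List.pyRange_one_eq_nil (hcount level)]
      rfl
    rw [pv_foldl_id _ hid]
    rw [PySem.List.pyRange_one_eq_nil (by omega : n ≤ (0 : Int))]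
    rfl
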